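-- pv_equiv track=rewrite | github.com/biubiu258/cdutetc | encrypt.py | js_u
-- ===== SOURCE A (Python) =====
-- HEX = "0123456789abcdef"
--
-- def js_c(d):
--     t = ""
--     for _ in range(4):
--         t = HEX[d & 0xF] + t
--         d >>= 4
--     return t
--
-- def js_u(x):
--     if x == 0:
--         return "0000"
--     base = 1 << 16
--     digits = []
--     while x:
--         digits.append(x & (base - 1))
--         x >>= 16
--     i = len(digits) - 1
--     while i > 0 and digits[i] == 0:
--         i -= 1
--     return "".join(js_c(digits[j]) for j in range(i, -1, -1))
-- ===== SOURCE B (Python) =====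
-- def js_u(x):
--     if x == 0:
--         return "0000"
--     words = (x.bit_length() - 1) // 16 + 1
--     return format(x, '0{}x'.format(4 * words))
-- ===== Notes on version B (the rewrite author's own statement) =====
-- stated objective: simpler
-- what changed: B replaces A's word-list building loop, trailing-zero trimming loop and per-word nibble loop with a closed-form word count from x.bit_length() and a single zero-padded hex format call.
import Mathlib
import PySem

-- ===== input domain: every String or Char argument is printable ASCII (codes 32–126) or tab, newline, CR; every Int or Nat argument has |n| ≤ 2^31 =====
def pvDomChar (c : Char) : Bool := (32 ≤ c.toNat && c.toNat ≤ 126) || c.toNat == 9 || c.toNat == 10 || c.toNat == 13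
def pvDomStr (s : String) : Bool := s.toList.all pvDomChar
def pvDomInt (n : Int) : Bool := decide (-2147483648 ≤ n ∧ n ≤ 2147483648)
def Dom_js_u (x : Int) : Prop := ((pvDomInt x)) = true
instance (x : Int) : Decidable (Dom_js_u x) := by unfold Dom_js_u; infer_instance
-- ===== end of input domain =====

-- B replaces A's word-list building, trimming loop and per-chunk nibble loop by one closed-form
-- word count from bit_length and a single zero-padded hex format (objective: simpler).

-- ===== PORT A =====
-- HEX = "0123456789abcdef"; string values are computed on their char lists (PySem convention)
def pvHEX : List Char := "0123456789abcdef".toList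

-- the 'for _ in range(4)' loop of js_c: t = HEX[d & 0xF] + t; d >>= 4
def js_c_loop : Nat → List Char → Int → List Char
  | 0, t, _ => t
  | k+1, t, d =>
      js_c_loop k (((PySem.List.pyGet? pvHEX (PySem.Int.band d 15)).getD ' ') :: t) (d >>> (4:Nat))

def js_c (d : Int) : List Char := js_c_loop 4 [] d

-- 'while x:' — Python loops forever on negative x (outside Pre_); the guard 0 < x is faithful on Pre_
def js_u_digits (x : Int) : List Int :=
  if h : 0 < x then PySem.Int.band x ((1 <<< (16:Nat)) - 1) :: js_u_digits (x >>> (16:Nat)) else []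
termination_by x.toNat
decreasing_by
  have hx : x >>> (16:Nat) = x / 65536 := Int.shiftRight_eq_div_pow x 16
  omega

-- 'while i > 0 and digits[i] == 0: i -= 1'
def js_u_trim (digits : List Int) (i : Int) : Int :=
  if h : 0 < i ∧ PySem.List.pyGetD digits i 0 = 0 then js_u_trim digits (i - 1) else i
termination_by i.toNat
decreasing_by omega

def js_u (x : Int) : String :=
  if x = 0 then "0000"
  else
    let digits := js_u_digits x
    let i := js_u_trim digits (PySem.List.len digits - 1)
    String.mk (PySem.Chars.join []
      ((PySem.List.pyRange i (-1) (-1)).map (fun j => js_c (PySem.List.pyGetD digits j 0))))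

-- ===== PORT B =====
-- hand port of format(x, '0{}x') for 0 ≤ x: lowercase hex digits, left-padded with '0' (exact there)
def hexDigitB (n : Nat) : Char := "0123456789abcdef".toList.getD n ' '

def hexCharsB (n : Nat) : List Char :=
  if n = 0 then [] else hexCharsB (n / 16) ++ [hexDigitB (n % 16)]
termination_by n
decreasing_by exact Nat.div_lt_self (by omega) (by omega)

def padHexB (width : Nat) (x : Int) : List Char :=
  List.replicate (width - (hexCharsB x.toNat).length) '0' ++ hexCharsB x.toNat

-- x.bit_length() is PySem.Int.bitLength
def js_u_alt (x : Int) : String :=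
  if x = 0 then "0000"
  else
    let words := (PySem.Int.bitLength x - 1) / 16 + 1
    String.mk (padHexB (4 * words) x)

-- ===== PRECONDITION & SPEC =====
-- Pre_ excludes negative x, on which A's 'while x:' loop never terminates (no return value).
def Pre_js_u (x : Int) : Prop := 0 ≤ x
instance (x : Int) : Decidable (Pre_js_u x) := by unfold Pre_js_u; infer_instance
def pvWitness_js_u : Int := 300000

def Spec_js_u (x : Int) (out : String) : Prop := out = js_u_alt x
instance (x : Int) (out : String) : Decidable (Spec_js_u x out) := by unfold Spec_js_u; infer_instance

-- ===== CLAIM (what is proved, stated in full; the proofs are below) =====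
def Claim_equal_js_u : Prop := ∀ (x : Int), Dom_js_u x → Pre_js_u x → Spec_js_u x (js_u x)

-- ===== LEMMAS AND PROOFS =====

-- the four hex nibbles of a 16-bit word, most significant first
def nib4 (m : Nat) : List Char :=
  [hexDigitB (m / 4096 % 16), hexDigitB (m / 256 % 16), hexDigitB (m / 16 % 16), hexDigitB (m % 16)]

theorem shiftRight_natCast_eq (m k : Nat) : ((m:Int) >>> k) = ((m >>> k : Nat) : Int) := by simp

theorem band_natCast_mod16 (m : Nat) : PySem.Int.band (m:Int) 15 = ((m % 16 : Nat) : Int) := by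
  rw [show (15:Int) = ((15:Nat):Int) by norm_num, PySem.Int.band_natCast]
  have := Nat.and_two_pow_sub_one_eq_mod m 4
  norm_num at this; omega

theorem band_natCast_mod65536 (m : Nat) :
    PySem.Int.band (m:Int) ((1 <<< (16:Nat)) - 1) = ((m % 65536 : Nat) : Int) := by
  rw [show ((1 <<< (16:Nat)) - 1 : Int) = ((65535:Nat):Int) by decide, PySem.Int.band_natCast]
  have := Nat.and_two_pow_sub_one_eq_mod m 16
  norm_num at this; omega

theorem pyGet_pvHEX (n : Nat) (h : n < 16) :
    (PySem.List.pyGet? pvHEX ((n:Nat):Int)).getD ' ' = hexDigitB n := by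
  interval_cases n <;> rfl

theorem jc_step (k : Nat) (t : List Char) (m : Nat) :
    js_c_loop (k+1) t (m:Int) = js_c_loop k (hexDigitB (m % 16) :: t) ((m / 16 : Nat) : Int) := by
  rw [js_c_loop, band_natCast_mod16, pyGet_pvHEX _ (Nat.mod_lt _ (by omega))]
  rw [show ((m:Int) >>> (4:Nat)) = ((m / 16 : Nat) : Int) by
    rw [shiftRight_natCast_eq, Nat.shiftRight_eq_div_pow]]

theorem jc_natCast (m : Nat) : js_c ((m:Nat):Int) = nib4 m := by
  unfold js_c
  rw [jc_step, jc_step, jc_step, jc_step]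
  simp [js_c_loop, nib4, Nat.div_div_eq_div_mul]

-- unfolding equations for js_u_digits
theorem digits_pos (x : Int) (h : 0 < x) :
    js_u_digits x = PySem.Int.band x ((1 <<< (16:Nat)) - 1) :: js_u_digits (x >>> (16:Nat)) := by
  rw [js_u_digits]; simp [h]

theorem digits_nonpos (x : Int) (h : ¬ 0 < x) : js_u_digits x = [] := by
  rw [js_u_digits]; simp [h]

theorem shift16_natCast (m : Nat) : ((m:Int) >>> (16:Nat)) = ((m / 65536 : Nat) : Int) := by
  rw [shiftRight_natCast_eq, Nat.shiftRight_eq_div_pow]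

theorem digits_natCast (m : Nat) (h : 0 < m) :
    js_u_digits (m:Int) = ((m % 65536 : Nat) : Int) :: js_u_digits ((m / 65536 : Nat) : Int) := by
  rw [digits_pos _ (by exact_mod_cast h), band_natCast_mod65536, shift16_natCast]

theorem digits_last (m : Nat) (h : 0 < m) :
    js_u_digits (m:Int) ≠ [] ∧ (js_u_digits (m:Int)).getLast? ≠ some 0 := by
  induction m using Nat.strong_induction_on with
  | _ m ih =>
    rw [digits_natCast m h]
    by_cases h2 : m < 65536
    · have : m / 65536 = 0 := by omega
      rw [this, Nat.cast_zero]
      rw [digits_nonpos 0 (by omega)]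
      refine ⟨by simp, ?_⟩
      simp only [List.getLast?_singleton]
      have : m % 65536 = m := by omega
      rw [this]
      intro hc
      have : m = 0 := by exact_mod_cast Option.some.inj hc
      omega
    · have hdiv : 0 < m / 65536 := by omega
      obtain ⟨hne, hlast⟩ := ih (m / 65536) (by omega) hdiv
      refine ⟨by simp, ?_⟩
      obtain ⟨v, hv⟩ := Option.isSome_iff_exists.mp (List.getLast?_isSome.mpr hne)
      rw [List.getLast?_cons, hv]
      simp only [Option.getD_some, ne_eq, Option.some.injEq]
      intro hc
      exact hlast (by rw [hv, hc])

theorem trim_fix (ds : List Int) (hne : ds ≠ []) (hlast : ds.getLast? ≠ some 0) :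
    js_u_trim ds (PySem.List.len ds - 1) = PySem.List.len ds - 1 := by
  rw [js_u_trim]
  rw [dif_neg]
  intro ⟨h1, h2⟩
  apply hlast
  have hL : 1 ≤ ds.length := List.length_pos_iff.mpr hne
  have : PySem.List.len ds - 1 = ((ds.length - 1 : Nat) : Int) := by
    simp [PySem.List.len_eq]; omega
  rw [this, PySem.List.pyGetD_natCast] at h2
  rw [List.getLast?_eq_getElem?]
  rw [List.getD, List.getElem?_eq_getElem (by omega)] at h2
  rw [List.getElem?_eq_getElem (by omega)]
  exact congrArg some (by simpa using h2)

theorem join_nil_flatten (parts : List (List Char)) :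
    PySem.Chars.join [] parts = parts.flatten := by
  induction parts with
  | nil => rfl
  | cons p ps ih =>
    cases ps with
    | nil => simp [PySem.Chars.join, List.intercalate]
    | cons q qs =>
      rw [PySem.Chars.join_cons_cons]
      simp_all

theorem A_join (ds : List Int) :
    PySem.Chars.join []
      ((PySem.List.pyRange (PySem.List.len ds - 1) (-1) (-1)).map
        (fun j => js_c (PySem.List.pyGetD ds j 0)))
    = ((ds.map js_c).reverse).flatten := by
  rw [PySem.List.pyRange_neg_one_eq_reverse]
  rw [show ((-1:Int) + 1) = 0 by norm_num, show (PySem.List.len ds - 1 + 1) = PySem.List.len ds by ring]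
  rw [List.map_reverse]
  rw [show (fun j => js_c (PySem.List.pyGetD ds j 0))
        = js_c ∘ (fun j => PySem.List.pyGetD ds j 0) from rfl]
  rw [← List.map_map]
  rw [PySem.List.map_pyGetD_pyRange_zero]
  rw [join_nil_flatten]

theorem bitLength_le (m k : Nat) (h : m < 2^k) : PySem.Int.bitLength (m:Int) ≤ k := by
  by_contra hc
  have h2 := PySem.Int.two_pow_bitLength_le (m:Int)
  by_cases hm : m = 0
  · subst hm; simp [PySem.Int.bitLength_zero] at hc
  · have h3 : 2 ^ (PySem.Int.bitLength (m:Int) - 1) ≤ (m:Int).natAbs := h2 (by exact_mod_cast hm)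
    have h4 : (m:Int).natAbs = m := Int.natAbs_natCast m
    have h5 : k ≤ PySem.Int.bitLength (m:Int) - 1 := by omega
    have := Nat.pow_le_pow_right (by omega : 1 ≤ 2) h5
    omega

theorem bitLength_pos (m : Nat) (h : 0 < m) : 1 ≤ PySem.Int.bitLength (m:Int) := by
  have := PySem.Int.lt_two_pow_bitLength (m:Int)
  rw [Int.natAbs_natCast] at this
  by_contra hc
  have : PySem.Int.bitLength (m:Int) = 0 := by omega
  simp [this] at *
  omega

theorem bitLength_shift (k : Nat) : ∀ m : Nat, 2^k ≤ m →
    PySem.Int.bitLength (m:Int) = PySem.Int.bitLength ((m / 2^k : Nat) : Int) + k := by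
  induction k with
  | zero => intro m _; simp
  | succ k ih =>
    intro m hm
    have h1 : 0 < m := by
      have : 0 < 2^(k+1) := Nat.pow_pos (by omega)
      omega
    rw [PySem.Int.bitLength_natCast h1]
    have h2 : 2^k ≤ m / 2 := by
      have : 2^(k+1) = 2^k * 2 := by ring
      omega
    rw [ih (m / 2) h2]
    have : m / 2 / 2^k = m / 2^(k+1) := by
      rw [Nat.div_div_eq_div_mul]; ring_nf
    rw [this]; ring

theorem bitLength_div65536 (m : Nat) (h : 65536 ≤ m) :
    PySem.Int.bitLength (m:Int) = PySem.Int.bitLength ((m / 65536 : Nat) : Int) + 16 := by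
  have := bitLength_shift 16 m (by norm_num; omega)
  norm_num at this
  exact this

theorem hexCharsB_zero : hexCharsB 0 = [] := by rw [hexCharsB]; simp

theorem hexCharsB_pos (n : Nat) (h : 0 < n) :
    hexCharsB n = hexCharsB (n / 16) ++ [hexDigitB (n % 16)] := by
  rw [hexCharsB]; simp [Nat.pos_iff_ne_zero.mp h]

theorem hexStep (n r : Nat) (hn : 0 < n) (hr : r < 16) :
    hexCharsB (n * 16 + r) = hexCharsB n ++ [hexDigitB r] := by
  rw [hexCharsB_pos _ (by omega)]
  have h1 : (n * 16 + r) / 16 = n := by omega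
  have h2 : (n * 16 + r) % 16 = r := by omega
  rw [h1, h2]

theorem hexSplit (n r : Nat) (hn : 0 < n) (hr : r < 65536) :
    hexCharsB (n * 65536 + r) = hexCharsB n ++ nib4 r := by
  have e : n * 65536 + r = (((n * 16 + r / 4096) * 16 + r / 256 % 16) * 16 + r / 16 % 16) * 16 + r % 16 := by
    omega
  rw [e]
  rw [hexStep _ _ (by positivity) (by omega)]
  rw [hexStep _ _ (by positivity) (by omega)]
  rw [hexStep _ _ (by positivity) (by omega)]
  rw [hexStep _ _ (by omega) (by omega)]
  have : r / 4096 % 16 = r / 4096 := by omega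
  simp [nib4, this]

-- the 4-digit zero-padded hex of a 16-bit word is its four nibbles
theorem hd0 : hexDigitB 0 = '0' := by decide

-- the 4-digit zero-padded hex of a 16-bit word is its four nibbles
theorem chunk_eq (m : Nat) (h : m < 65536) :
    List.replicate (4 - (hexCharsB m).length) '0' ++ hexCharsB m = nib4 m := by
  rcases Nat.eq_zero_or_pos m with hm | hm
  · subst hm
    rw [hexCharsB_zero]
    simp [nib4, hd0]
  · by_cases h1 : m < 16
    · rw [hexCharsB_pos m hm, Nat.div_eq_of_lt h1, hexCharsB_zero, Nat.mod_eq_of_lt h1]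
      have e3 : m / 4096 % 16 = 0 := by omega
      have e2 : m / 256 % 16 = 0 := by omega
      have e1 : m / 16 % 16 = 0 := by omega
      simp [nib4, e1, e2, e3, hd0, Nat.mod_eq_of_lt h1]
    · by_cases h2 : m < 256
      · rw [hexCharsB_pos m hm, hexCharsB_pos (m / 16) (by omega), Nat.div_div_eq_div_mul]
        rw [show (16 * 16 : Nat) = 256 from rfl, show m / 256 = 0 by omega, hexCharsB_zero]
        have e3 : m / 4096 % 16 = 0 := by omega
        have e2 : m / 256 % 16 = 0 := by omega
        have e1 : m / 16 % 16 = m / 16 := by omega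
        simp [nib4, e1, e2, e3, hd0]
      · by_cases h3 : m < 4096
        · rw [hexCharsB_pos m hm, hexCharsB_pos (m / 16) (by omega), Nat.div_div_eq_div_mul,
              show (16 * 16 : Nat) = 256 from rfl, hexCharsB_pos (m / 256) (by omega),
              Nat.div_div_eq_div_mul, show (256 * 16 : Nat) = 4096 from rfl,
              show m / 4096 = 0 by omega, hexCharsB_zero]
          have e3 : m / 4096 % 16 = 0 := by omega
          have e2 : m / 256 % 16 = m / 256 := by omega
          simp [nib4, e2, e3, hd0]
        · rw [hexCharsB_pos m hm, hexCharsB_pos (m / 16) (by omega), Nat.div_div_eq_div_mul,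
              show (16 * 16 : Nat) = 256 from rfl, hexCharsB_pos (m / 256) (by omega),
              Nat.div_div_eq_div_mul, show (256 * 16 : Nat) = 4096 from rfl,
              hexCharsB_pos (m / 4096) (by omega), Nat.div_div_eq_div_mul,
              show (4096 * 16 : Nat) = 65536 from rfl,
              show m / 65536 = 0 by omega, hexCharsB_zero]
          have e3 : m / 4096 % 16 = m / 4096 := by omega
          simp [nib4, e3]

-- main bridge: A's joined chunks = B's padded hex, for positive inputs
theorem main_eq (m : Nat) (h : 0 < m) :
    (((js_u_digits (m:Int)).map js_c).reverse).flatten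
    = List.replicate (4 * ((PySem.Int.bitLength (m:Int) - 1) / 16 + 1) - (hexCharsB m).length) '0'
        ++ hexCharsB m := by
  induction m using Nat.strong_induction_on with
  | _ m ih =>
    rw [digits_natCast m h]
    by_cases h2 : m < 65536
    · have hd : m / 65536 = 0 := by omega
      have hr : m % 65536 = m := by omega
      rw [hd, hr, Nat.cast_zero, digits_nonpos 0 (by omega)]
      simp only [List.map_cons, List.map_nil, List.reverse_cons, List.reverse_nil,
        List.nil_append, List.flatten_cons, List.flatten_nil, List.append_nil]
      rw [jc_natCast]
      have hb1 : 1 ≤ PySem.Int.bitLength (m:Int) := bitLength_pos m h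
      have hb16 : PySem.Int.bitLength (m:Int) ≤ 16 := bitLength_le m 16 (by norm_num; omega)
      have : 4 * ((PySem.Int.bitLength (m:Int) - 1) / 16 + 1) = 4 := by omega
      rw [this, chunk_eq m h2]
    · have hn : 0 < m / 65536 := by omega
      have hsplit := hexSplit (m / 65536) (m % 65536) hn (by omega)
      have hm' : m / 65536 * 65536 + m % 65536 = m := by omega
      rw [hm'] at hsplit
      simp only [List.map_cons, List.reverse_cons, List.flatten_append, List.flatten_cons,
        List.flatten_nil, List.append_nil]
      rw [ih (m / 65536) (by omega) hn]
      rw [jc_natCast, hsplit]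
      rw [bitLength_div65536 m (by omega)]
      have hb1 : 1 ≤ PySem.Int.bitLength ((m / 65536 : Nat) : Int) := bitLength_pos _ hn
      have e : 4 * ((PySem.Int.bitLength ((m/65536:Nat):Int) + 16 - 1) / 16 + 1)
          - (hexCharsB (m/65536) ++ nib4 (m % 65536)).length
          = 4 * ((PySem.Int.bitLength ((m/65536:Nat):Int) - 1) / 16 + 1) - (hexCharsB (m/65536)).length := by
        have hlen : (hexCharsB (m/65536) ++ nib4 (m % 65536)).length
            = (hexCharsB (m/65536)).length + 4 := by simp [nib4]
        rw [hlen]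
        omega
      rw [e, List.append_assoc]

-- ===== VERDICT (by name: the statement is the Claim_ definition above) =====
theorem js_u_spec : Claim_equal_js_u := by
  intro x _ hpre
  unfold Spec_js_u
  by_cases hx : x = 0
  · subst hx; rfl
  · obtain ⟨m, rfl⟩ := Int.eq_ofNat_of_zero_le hpre
    have hm : 0 < m := by
      rcases Nat.eq_zero_or_pos m with h | h
      · subst h; simp at hx
      · exact h
    obtain ⟨hne, hlast⟩ := digits_last m hm
    simp only [js_u, js_u_alt, if_neg hx, padHexB]
    rw [trim_fix _ hne hlast, A_join, main_eq m hm, Int.toNat_natCast]
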